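-- pv_equiv track=rewrite | github.com/squillero/computer-sciences | Python/src/2024-25/20241220 bowling.py | players_with_most_frequent_score
-- ===== SOURCE A (Python) =====
-- def players_with_most_frequent_score(data, score):
--     top = list()
--     top_count = -1
--     for player, scores in data.items():
--         num = scores.count(score)
--         if num > top_count:
--             top_count = num
--             top = [player]
--         elif num == top_count:
--             top.append(player)
--     return top
-- ===== SOURCE B (Python) =====
-- def players_with_most_frequent_score(data, score):
--     counts = {player: scores.count(score) for player, scores in data.items()}
--     if not counts:
--         return []
--     m = max(counts.values())
--     return [player for player in counts if counts[player] == m]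
-- ===== Notes on version B (the rewrite author's own statement) =====
-- stated objective: idiomatic
-- what changed: A keeps a running best-count/best-list state updated branch-by-branch inside one loop; B first builds a counts dict in one comprehension, then takes m = max(counts.values()) and selects the players with count m in a second comprehension (dict insertion order preserves tie order); Pre_ only requires distinct player names, which every real Python dict input satisfies.
import Mathlib
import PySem

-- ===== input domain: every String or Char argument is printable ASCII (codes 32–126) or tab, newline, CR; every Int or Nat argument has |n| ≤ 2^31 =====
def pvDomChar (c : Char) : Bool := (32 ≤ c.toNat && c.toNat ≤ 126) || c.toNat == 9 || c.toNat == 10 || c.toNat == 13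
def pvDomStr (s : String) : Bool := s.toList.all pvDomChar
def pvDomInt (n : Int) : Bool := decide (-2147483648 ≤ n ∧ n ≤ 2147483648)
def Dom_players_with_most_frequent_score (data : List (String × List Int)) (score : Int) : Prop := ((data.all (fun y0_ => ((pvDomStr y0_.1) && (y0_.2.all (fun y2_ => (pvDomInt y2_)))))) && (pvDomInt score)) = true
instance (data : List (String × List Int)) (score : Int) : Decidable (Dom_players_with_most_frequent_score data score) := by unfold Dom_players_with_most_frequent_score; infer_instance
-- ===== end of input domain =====

-- Header: B replaces A's running best-count/best-list loop by a counts dict built once,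
-- then max over its values and a selecting comprehension (objective: idiomatic).


-- ===== PORT A =====
def players_with_most_frequent_score (data : List (String × List Int)) (score : Int) : List String :=
  (data.foldl
    (fun (st : List String × Int) pr =>
      let num : Int := (PySem.List.count pr.2 score : Int)
      if num > st.2 then ([pr.1], num)
      else if num = st.2 then (st.1 ++ [pr.1], st.2)
      else st)
    (([] : List String), (-1 : Int))).1

-- ===== PORT B =====
def players_with_most_frequent_score_alt (data : List (String × List Int)) (score : Int) : List String :=
  let counts : PySem.Dict String Int :=
    data.foldl (fun d pr => d.insert pr.1 (PySem.List.count pr.2 score : Int)) PySem.Dict.empty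
  if counts.items.isEmpty then []
  else
    match PySem.List.max? counts.values (fun v => v) with
    | none => []   -- unreachable: counts is nonempty here (totalization only)
    | some m => counts.keys.filter (fun player => counts.getD player 0 = m)

-- ===== PRECONDITION & SPEC =====
-- Pre_ excludes association lists with duplicate player names: the Python argument is a
-- dict, whose keys are necessarily distinct, so no real Python input is excluded.
def Pre_players_with_most_frequent_score (data : List (String × List Int)) (score : Int) : Prop :=
  (data.map Prod.fst).Nodup

instance (data : List (String × List Int)) (score : Int) : Decidable (Pre_players_with_most_frequent_score data score) := by unfold Pre_players_with_most_frequent_score; infer_instance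

def pvWitness_players_with_most_frequent_score : (List (String × List Int)) × Int :=
  ([("alice", [10, 7, 10]), ("bob", [10]), ("carol", [7, 7])], 10)

def Spec_players_with_most_frequent_score (data : List (String × List Int)) (score : Int) (out : List String) : Prop := out = players_with_most_frequent_score_alt data score
instance (data : List (String × List Int)) (score : Int) (out : List String) : Decidable (Spec_players_with_most_frequent_score data score out) := by unfold Spec_players_with_most_frequent_score; infer_instance

-- ===== CLAIM (what is proved, stated in full; the proofs are below) =====
def Claim_equal_players_with_most_frequent_score : Prop := ∀ (data : List (String × List Int)) (score : Int), Dom_players_with_most_frequent_score data score → Pre_players_with_most_frequent_score data score → Spec_players_with_most_frequent_score data score (players_with_most_frequent_score data score)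

-- ===== LEMMAS AND PROOFS =====

-- the (player, count) pairs both programs work from
def pvCounts (data : List (String × List Int)) (score : Int) : List (String × Int) :=
  data.map (fun p => (p.1, (PySem.List.count p.2 score : Int)))

-- A's running maximum
def pvM (l : List (String × Int)) : Int :=
  l.foldl (fun a p => max a p.2) (-1)

-- A's step on a precomputed (player, count) pair
def pvStep (st : List String × Int) (x : String × Int) : List String × Int :=
  if x.2 > st.2 then ([x.1], x.2)
  else if x.2 = st.2 then (st.1 ++ [x.1], st.2)
  else st

theorem pvM_init_le (l : List (String × Int)) (a : Int) :
    a ≤ l.foldl (fun a p => max a p.2) a := by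
  induction l generalizing a with
  | nil => simp
  | cons q t ih => exact le_trans (le_max_left a q.2) (ih (max a q.2))

theorem pv_le_pvM (l : List (String × Int)) (a : Int) :
    ∀ p ∈ l, p.2 ≤ l.foldl (fun a p => max a p.2) a := by
  induction l generalizing a with
  | nil => simp
  | cons q t ih =>
    intro p hp
    rcases List.mem_cons.mp hp with h | h
    · subst h
      exact le_trans (le_max_right a p.2) (pvM_init_le t (max a p.2))
    · exact ih (max a q.2) p h

theorem pvM_append (l : List (String × Int)) (x : String × Int) :
    pvM (l ++ [x]) = max (pvM l) x.2 := by
  simp [pvM]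

theorem pv_foldA (l : List (String × Int)) :
    l.foldl pvStep (([] : List String), (-1 : Int)) =
      ((l.filter (fun p => p.2 = pvM l)).map Prod.fst, pvM l) := by
  induction l using List.reverseRecOn with
  | nil => simp [pvM]
  | append_singleton l x ih =>
    rw [List.foldl_append, ih, pvM_append]
    rcases lt_trichotomy (pvM l) x.2 with hlt | heq | hgt
    · have hmax : max (pvM l) x.2 = x.2 := max_eq_right hlt.le
      have hnone : l.filter (fun p => p.2 = x.2) = [] := by
        rw [List.filter_eq_nil_iff]
        intro a ha hq
        have hq' : a.2 = x.2 := by simpa using hq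
        have h1 := pv_le_pvM l (-1) a ha
        rw [hq'] at h1
        exact absurd h1 (not_le.mpr hlt)
      simp [pvStep, hlt, hnone, hmax]
    · simp [pvStep, heq.symm, List.filter_append]
    · have hmax : max (pvM l) x.2 = pvM l := max_eq_left hgt.le
      have hx : ¬ (x.2 > pvM l) := not_lt.mpr hgt.le
      have hne : ¬ (x.2 = pvM l) := ne_of_lt hgt
      simp [pvStep, hx, hne, hmax, List.filter_append]

theorem pvA_eq (data : List (String × List Int)) (score : Int) :
    players_with_most_frequent_score data score =
      ((pvCounts data score).filter (fun p => p.2 = pvM (pvCounts data score))).map Prod.fst := by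
  unfold players_with_most_frequent_score
  have : data.foldl
      (fun (st : List String × Int) pr =>
        let num : Int := (PySem.List.count pr.2 score : Int)
        if num > st.2 then ([pr.1], num)
        else if num = st.2 then (st.1 ++ [pr.1], st.2)
        else st)
      (([] : List String), (-1 : Int))
      = (pvCounts data score).foldl pvStep (([] : List String), (-1 : Int)) := by
    rw [pvCounts, List.foldl_map]
    rfl
  rw [this, pv_foldA]

-- building the counts dict over fresh keys just appends the pairs
theorem pv_dict_build (l : List (String × Int)) (d : PySem.Dict String Int)
    (hnd : (l.map Prod.fst).Nodup) (hdisj : ∀ k ∈ l.map Prod.fst, d.contains k = false) :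
    (l.foldl (fun d p => d.insert p.1 p.2) d).items = d.items ++ l := by
  induction l generalizing d with
  | nil => simp
  | cons p t ih =>
    rw [List.map_cons, List.nodup_cons] at hnd
    obtain ⟨hp1, hnd'⟩ := hnd
    have hpc : d.contains p.1 = false := hdisj p.1 (by simp)
    have hitems := PySem.Dict.items_insert_of_not_contains d p.2 hpc
    have hdisj' : ∀ k ∈ t.map Prod.fst, (d.insert p.1 p.2).contains k = false := by
      intro k hk
      have hkne : k ≠ p.1 := fun h => hp1 (h ▸ hk)
      have hkd : d.contains k = false := hdisj k (by simp only [List.map_cons]; exact List.mem_cons_of_mem _ hk)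
      simp only [PySem.Dict.contains] at hkd ⊢
      rw [hitems, List.any_append]
      simp only [hkd, Bool.false_or, List.any_cons, List.any_nil, Bool.or_false]
      simpa using fun h => hkne h.symm
    rw [List.foldl_cons, ih (d.insert p.1 p.2) hnd' hdisj', hitems, List.append_assoc]
    rfl

theorem pv_counts_items (data : List (String × List Int)) (score : Int)
    (hpre : (data.map Prod.fst).Nodup) :
    (data.foldl (fun d pr => d.insert pr.1 (PySem.List.count pr.2 score : Int))
        (PySem.Dict.empty : PySem.Dict String Int)).items = pvCounts data score := by
  have h1 : data.foldl (fun d pr => d.insert pr.1 (PySem.List.count pr.2 score : Int))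
        (PySem.Dict.empty : PySem.Dict String Int)
      = (pvCounts data score).foldl (fun d p => d.insert p.1 p.2) PySem.Dict.empty := by
    rw [pvCounts, List.foldl_map]
  have hkeys : (pvCounts data score).map Prod.fst = data.map Prod.fst := by
    simp [pvCounts]
  rw [h1, pv_dict_build _ _ (hkeys ▸ hpre) (by intro k _; simp [PySem.Dict.contains, PySem.Dict.empty])]
  simp [PySem.Dict.empty]

theorem pv_lookup (cs : List (String × Int)) (hnd : (cs.map Prod.fst).Nodup)
    (p : String × Int) (hp : p ∈ cs) :
    (PySem.Dict.mk cs).getD p.1 0 = p.2 := by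
  have : (PySem.Dict.mk cs).get? p.1 = some p.2 := by
    apply PySem.Dict.get?_of_mem_items
    · simpa using hp
    · simpa [PySem.Dict.keys] using hnd
  simp [PySem.Dict.getD, this]

theorem pv_filter_lookup (cs : List (String × Int)) (m : Int)
    (hnd : (cs.map Prod.fst).Nodup) :
    (cs.map Prod.fst).filter (fun k => decide ((PySem.Dict.mk cs).getD k 0 = m))
      = (cs.filter (fun p => p.2 = m)).map Prod.fst := by
  rw [List.filter_map]
  congr 1
  apply List.filter_congr
  intro p hp
  simp only [Function.comp]
  rw [pv_lookup cs hnd p hp]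

theorem pv_max_values (p : String × Int) (t : List (String × Int))
    (hpos : ∀ q ∈ p :: t, 0 ≤ q.2) :
    PySem.List.max? ((p :: t).map Prod.snd) (fun v => v) = some (pvM (p :: t)) := by
  rw [List.map_cons, PySem.List.max?_id_cons]
  have h2 : max (-1 : Int) p.2 = p.2 := max_eq_right (le_trans (by norm_num) (hpos p (by simp)))
  have h3 : pvM (p :: t) = t.foldl (fun a q => max a q.2) p.2 := by
    simp [pvM, h2]
  rw [h3, List.foldl_map]

-- ===== VERDICT (by name: the statement is the Claim_ definition above) =====
theorem players_with_most_frequent_score_spec : Claim_equal_players_with_most_frequent_score := by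
  intro data score _hdom hpre
  unfold Spec_players_with_most_frequent_score
  rw [pvA_eq]
  unfold players_with_most_frequent_score_alt
  simp only
  have hd : data.foldl (fun d pr => d.insert pr.1 (PySem.List.count pr.2 score : Int))
        (PySem.Dict.empty : PySem.Dict String Int) = PySem.Dict.mk (pvCounts data score) := by
    rw [← pv_counts_items data score hpre]
  rw [hd]
  have hnd : ((pvCounts data score).map Prod.fst).Nodup := by
    have h0 : (pvCounts data score).map Prod.fst = data.map Prod.fst := by simp [pvCounts]
    rw [h0]; exact hpre
  have hpos : ∀ q ∈ pvCounts data score, 0 ≤ q.2 := by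
    intro q hq
    rcases List.mem_map.mp hq with ⟨pr, _, hpr⟩
    rw [← hpr]
    exact Int.natCast_nonneg _
  cases hcs : pvCounts data score with
  | nil =>
      simp [pvM]
  | cons p t =>
      rw [hcs] at hnd hpos
      have hit : (PySem.Dict.mk (p :: t)).items = p :: t := rfl
      rw [hit, List.isEmpty_cons]
      simp only [Bool.false_eq_true, if_false]
      have hval : (PySem.Dict.mk (p :: t)).values = (p :: t).map Prod.snd := rfl
      rw [hval, pv_max_values p t hpos]
      have hkeys : (PySem.Dict.mk (p :: t)).keys = (p :: t).map Prod.fst := rfl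
      rw [hkeys]
      exact (pv_filter_lookup (p :: t) (pvM (p :: t)) hnd).symm
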